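-- pv_equiv track=rewrite | github.com/xpsh/advent2021 | day_20/day20.py | enhance_img
-- ===== SOURCE A (Python) =====
-- def enhance_img(img,alg):
--     out_img = []
--     for y in range(1,len(img)-1):
--         out_list = []
--         for x in range(1,len(img[0])-1):
--             pixels = []
--             for j in [-1,0,1]:
--                 for i in [-1,0,1]:
--                     pixels.append(img[y+j][x+i])
--             number = int(''.join(pixels).replace(".","0").replace("#","1"),2)
--             out_list.append(alg[number])
--         out_img.append(''.join(out_list))
--     return out_img
-- ===== SOURCE B (Python) =====
-- def enhance_img(img, alg):
--     h = len(img)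
--     if h <= 2:
--         return []
--     w = len(img[0])
--     out = []
--     for y in range(1, h - 1):
--         if w <= 2:
--             out.append('')
--             continue
--         r0, r1, r2 = img[y - 1], img[y], img[y + 1]
--         a = (r0[0] == '#') * 4 + (r0[1] == '#') * 2 + (r0[2] == '#')
--         b = (r1[0] == '#') * 4 + (r1[1] == '#') * 2 + (r1[2] == '#')
--         c = (r2[0] == '#') * 4 + (r2[1] == '#') * 2 + (r2[2] == '#')
--         line = [alg[a * 64 + b * 8 + c]]
--         for x in range(2, w - 1):
--             a = a * 2 % 8 + (r0[x + 1] == '#')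
--             b = b * 2 % 8 + (r1[x + 1] == '#')
--             c = c * 2 % 8 + (r2[x + 1] == '#')
--             line.append(alg[a * 64 + b * 8 + c])
--         out.append(''.join(line))
--     return out
-- ===== Notes on version B (the rewrite author's own statement) =====
-- stated objective: alternative
-- what changed: Replaces the per-pixel build of a 9-character string plus two str.replace calls and an int(_,2) parse with three rolling 3-bit row registers, shifted left one column per step with the departed column dropped and the new column brought in.
-- outside the precondition, e.g. on enhance_img(['...', '...', '...'], '#'): A returns ['#'], B returns ['#']; on enhance_img(['...', '...#', '...'], '#'): A returns ['#'], B returns ['#']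
import Mathlib
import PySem

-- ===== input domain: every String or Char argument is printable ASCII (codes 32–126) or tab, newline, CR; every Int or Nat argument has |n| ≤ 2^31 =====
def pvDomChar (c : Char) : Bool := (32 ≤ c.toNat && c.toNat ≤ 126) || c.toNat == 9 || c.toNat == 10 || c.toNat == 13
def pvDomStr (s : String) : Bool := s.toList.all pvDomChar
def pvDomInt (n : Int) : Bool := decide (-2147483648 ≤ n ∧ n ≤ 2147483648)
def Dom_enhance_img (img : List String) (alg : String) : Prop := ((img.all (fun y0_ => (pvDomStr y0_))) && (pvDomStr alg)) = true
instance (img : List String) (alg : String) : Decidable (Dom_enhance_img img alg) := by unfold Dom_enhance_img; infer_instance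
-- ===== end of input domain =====

-- B replaces the per-pixel 9-char string build + replace + int(_,2) parse with three rolling
-- 3-bit row registers (shift left, drop the departed column, bring in the new one).

-- ===== PORT A =====
-- img[y+j][x+i]  (IndexError = none; the default is never reached under Pre_)
def pyPix (img : List String) (y x : Int) : Char :=
  ((PySem.List.pyGet? img y).bind (fun r => PySem.Str.pyGet? r x)).getD ' '

def enhance_img (img : List String) (alg : String) : List String :=
  (PySem.List.pyRange 1 (PySem.List.len img - 1) 1).foldl (fun out_img y =>
    let out_list : List Char :=
      (PySem.List.pyRange 1 (PySem.Str.len ((PySem.List.pyGet? img 0).getD "") - 1) 1).foldl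
        (fun out_list x =>
          let pixels : List Char :=
            ([-1, 0, 1] : List Int).foldl (fun px j =>
              ([-1, 0, 1] : List Int).foldl (fun px i => px ++ [pyPix img (y + j) (x + i)]) px) []
          -- int(''.join(pixels).replace(".","0").replace("#","1"), 2); ValueError = none, excluded by Pre_
          let number : Int :=
            (PySem.Int.ofStrBase?
              (PySem.Str.replace (PySem.Str.replace (String.ofList pixels) "." "0") "#" "1") 2).getD (-1)
          out_list ++ [(PySem.Str.pyGet? alg number).getD ' ']) []
    out_img ++ [String.ofList out_list]) []

-- ===== PORT B =====
-- (c == '#') used as an int, and r[x] (defaults never reached under Pre_)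
def hashBit (c : Char) : Int := if c = '#' then 1 else 0
def chAt (r : String) (x : Int) : Char := (PySem.Str.pyGet? r x).getD ' '

def enhance_img_alt (img : List String) (alg : String) : List String :=
  let h : Int := PySem.List.len img
  if h ≤ 2 then [] else
  let w : Int := PySem.Str.len ((PySem.List.pyGet? img 0).getD "")
  (PySem.List.pyRange 1 (h - 1) 1).foldl (fun out y =>
    if w ≤ 2 then out ++ [""] else
    let r0 := (PySem.List.pyGet? img (y - 1)).getD ""
    let r1 := (PySem.List.pyGet? img y).getD ""
    let r2 := (PySem.List.pyGet? img (y + 1)).getD ""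
    let a := hashBit (chAt r0 0) * 4 + hashBit (chAt r0 1) * 2 + hashBit (chAt r0 2)
    let b := hashBit (chAt r1 0) * 4 + hashBit (chAt r1 1) * 2 + hashBit (chAt r1 2)
    let c := hashBit (chAt r2 0) * 4 + hashBit (chAt r2 1) * 2 + hashBit (chAt r2 2)
    let line : List Char := [(PySem.Str.pyGet? alg (a * 64 + b * 8 + c)).getD ' ']
    let st :=
      (PySem.List.pyRange 2 (w - 1) 1).foldl (fun (st : Int × Int × Int × List Char) x =>
        let a := PySem.Int.mod (st.1 * 2) 8 + hashBit (chAt r0 (x + 1))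
        let b := PySem.Int.mod (st.2.1 * 2) 8 + hashBit (chAt r1 (x + 1))
        let c := PySem.Int.mod (st.2.2.1 * 2) 8 + hashBit (chAt r2 (x + 1))
        (a, b, c, st.2.2.2 ++ [(PySem.Str.pyGet? alg (a * 64 + b * 8 + c)).getD ' ']))
        (a, b, c, line)
    out ++ [String.ofList st.2.2.2]) []

-- ===== PRECONDITION & SPEC =====
-- Pre_ excludes the inputs on which A raises (a pixel that is not '.'/'#' → ValueError; a row
-- shorter than row 0 or an alg index past the end → IndexError); it does so with the natural
-- rectangular-binary-grid/full-table shape, which also excludes some inputs A happens to return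
-- on: rows longer than row 0 whose extra tail is never read, and an alg shorter than 512 that
-- every actually-computed index happens to stay inside.
def Pre_enhance_img (img : List String) (alg : String) : Prop :=
  img.length ≤ 2 ∨ (img.headD "").toList.length ≤ 2 ∨
    (512 ≤ alg.toList.length ∧
      ∀ r ∈ img, r.toList.length = (img.headD "").toList.length ∧
        ∀ c ∈ r.toList, c = '.' ∨ c = '#')
instance (img : List String) (alg : String) : Decidable (Pre_enhance_img img alg) := by
  unfold Pre_enhance_img; infer_instance

def pvWitness_enhance_img : List String × String :=
  (["..", ".."], "#.")

def Spec_enhance_img (img : List String) (alg : String) (out : List String) : Prop := out = enhance_img_alt img alg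
instance (img : List String) (alg : String) (out : List String) : Decidable (Spec_enhance_img img alg out) := by unfold Spec_enhance_img; infer_instance

-- ===== CLAIM (what is proved, stated in full; the proofs are below) =====
def Claim_equal_enhance_img : Prop := ∀ (img : List String) (alg : String), Dom_enhance_img img alg → Pre_enhance_img img alg → Spec_enhance_img img alg (enhance_img img alg)

-- ===== LEMMAS AND PROOFS =====

-- the 9-bit window of row r centred at x (weights 4,2,1)
def winv (r : String) (x : Int) : Int :=
  hashBit (chAt r (x - 1)) * 4 + hashBit (chAt r x) * 2 + hashBit (chAt r (x + 1))

-- the character B emits at column x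
def colB (r0 r1 r2 alg : String) (x : Int) : Char :=
  (PySem.Str.pyGet? alg (winv r0 x * 64 + winv r1 x * 8 + winv r2 x)).getD ' '

-- all length-n lists of binary digit characters
def digN : Nat → List (List Char)
  | 0 => [[]]
  | n + 1 => (digN n).flatMap (fun l => [('0' :: l), ('1' :: l)])

-- base-2 value of a digit list
def dval (l : List Char) : Int := l.foldl (fun a c => a * 2 + (if c = '1' then 1 else 0)) 0

-- base-2 value of a pixel list under '.'=0, '#'=1
def binVal (l : List Char) : Int := l.foldl (fun a c => a * 2 + hashBit c) 0

lemma mem_digN : ∀ (l : List Char) (n : Nat), l.length = n →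
    (∀ c ∈ l, c = '0' ∨ c = '1') → l ∈ digN n := by
  intro l
  induction l with
  | nil => intro n hn _; subst hn; simp [digN]
  | cons c t ih =>
      intro n hn hb
      subst hn
      simp only [List.length_cons, digN, List.mem_flatMap]
      refine ⟨t, ih t.length rfl (fun d hd => hb d (List.mem_cons_of_mem _ hd)), ?_⟩
      rcases hb c List.mem_cons_self with h | h <;> simp [h]

-- int(_, 2) on every 9-digit binary string, evaluated once by the kernel
set_option maxRecDepth 8192 in
lemma parse_digits : ∀ l ∈ digN 9, PySem.Int.ofCharsBase? l 2 = some (dval l) := by decide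

-- s.replace(old, new) for single-character old/new is a character map
lemma replace_go_single (o nn : Char) :
    ∀ (l : List Char) (fuel : Nat) (acc : List Char), l.length ≤ fuel →
      PySem.Chars.replace.go [o] [nn] fuel l acc
        = acc.reverse ++ l.map (fun c => if c = o then nn else c) := by
  intro l
  induction l with
  | nil =>
      intro fuel acc _
      cases fuel <;> simp [PySem.Chars.replace.go]
  | cons c t ih =>
      intro fuel acc hf
      cases fuel with
      | zero => simp at hf
      | succ m =>
        rw [PySem.Chars.replace.go]
        by_cases hc : c = o
        · simp [hc, List.isPrefixOf, ih m (nn :: acc) (by simpa using hf)]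
        · have ho : ¬ o = c := fun h => hc h.symm
          simp [List.isPrefixOf, hc, ho, ih m (c :: acc) (by simpa using hf)]

lemma replace_single (l : List Char) (o nn : Char) :
    PySem.Chars.replace l [o] [nn] = l.map (fun c => if c = o then nn else c) := by
  simp [PySem.Chars.replace, replace_go_single o nn l l.length [] (le_refl _)]

lemma hashBit_mem : ∀ c, hashBit c = 0 ∨ hashBit c = 1 := by
  intro c; unfold hashBit; split_ifs <;> simp

-- A's join+replace+replace+int(_,2) pipeline on a binary 9-pixel block
lemma parse9 (l : List Char) (h9 : l.length = 9)
    (hb : ∀ c ∈ l, c = '.' ∨ c = '#') :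
    (PySem.Int.ofStrBase?
      (PySem.Str.replace (PySem.Str.replace (String.ofList l) "." "0") "#" "1") 2).getD (-1)
    = binVal l := by
  have ht : (PySem.Str.replace (PySem.Str.replace (String.ofList l) "." "0") "#" "1").toList
      = (l.map (fun c => if c = '.' then '0' else c)).map (fun c => if c = '#' then '1' else c) := by
    rw [PySem.Str.toList_replace, PySem.Str.toList_replace, String.toList_ofList,
      show (".": String).toList = ['.'] from by decide,
      show ("0": String).toList = ['0'] from by decide,
      show ("#": String).toList = ['#'] from by decide,
      show ("1": String).toList = ['1'] from by decide,
      replace_single, replace_single]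
  have hdig : ∀ c ∈ (l.map (fun c => if c = '.' then '0' else c)).map
      (fun c => if c = '#' then '1' else c), c = '0' ∨ c = '1' := by
    intro c hc
    simp only [List.map_map, List.mem_map, Function.comp] at hc
    obtain ⟨b, hbmem, rfl⟩ := hc
    rcases hb b hbmem with h | h <;> simp [h]
  have hp := parse_digits _ (mem_digN _ 9 (by simp [h9]) hdig)
  rw [PySem.Int.ofStrBase?, ht, hp, Option.getD_some, List.map_map, dval, List.foldl_map]
  unfold binVal
  apply PySem.List.foldl_congr_mem
  intro acc c hc
  rcases hb c hc with h | h <;> simp [h, Function.comp, hashBit]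

lemma chAt_binary (r : String) (W : Nat) (hl : r.toList.length = W)
    (hb : ∀ c ∈ r.toList, c = '.' ∨ c = '#') (z : Int) (h0 : 0 ≤ z) (h1 : z < (W : Int)) :
    chAt r z = '.' ∨ chAt r z = '#' := by
  unfold chAt
  lift z to Nat using h0
  rw [PySem.Str.pyGet?_natCast]
  have hz : z < r.toList.length := by rw [hl]; exact_mod_cast h1
  rw [List.getElem?_eq_getElem hz]
  exact hb _ (List.getElem_mem hz)

lemma roll (r : String) (x : Int) :
    PySem.Int.mod (winv r x * 2) 8 + hashBit (chAt r (x + 2)) = winv r (x + 1) := by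
  rw [PySem.Int.mod_eq_emod_of_pos (by norm_num)]
  unfold winv
  have h1 := hashBit_mem (chAt r (x - 1))
  have h2 := hashBit_mem (chAt r x)
  have h3 := hashBit_mem (chAt r (x + 1))
  have h4 := hashBit_mem (chAt r (x + 2))
  have hx : x + 1 - 1 = x := by ring
  have hx2 : x + 1 + 1 = x + 2 := by ring
  rw [hx, hx2]
  rcases h1 with h1 | h1 <;> rcases h2 with h2 | h2 <;>
    rcases h3 with h3 | h3 <;> rcases h4 with h4 | h4 <;> rw [h1, h2, h3, h4] <;> decide

lemma rollFold (r0 r1 r2 alg : String) (x0 : Int) (n : Nat) (L : List Char) :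
    (PySem.List.pyRange (x0 + 1) (x0 + 1 + n) 1).foldl
      (fun (st : Int × Int × Int × List Char) x =>
        (PySem.Int.mod (st.1 * 2) 8 + hashBit (chAt r0 (x + 1)),
         PySem.Int.mod (st.2.1 * 2) 8 + hashBit (chAt r1 (x + 1)),
         PySem.Int.mod (st.2.2.1 * 2) 8 + hashBit (chAt r2 (x + 1)),
         st.2.2.2 ++ [(PySem.Str.pyGet? alg
           ((PySem.Int.mod (st.1 * 2) 8 + hashBit (chAt r0 (x + 1))) * 64
             + (PySem.Int.mod (st.2.1 * 2) 8 + hashBit (chAt r1 (x + 1))) * 8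
             + (PySem.Int.mod (st.2.2.1 * 2) 8 + hashBit (chAt r2 (x + 1))))).getD ' ']))
      (winv r0 x0, winv r1 x0, winv r2 x0, L)
    = (winv r0 (x0 + n), winv r1 (x0 + n), winv r2 (x0 + n),
        L ++ (PySem.List.pyRange (x0 + 1) (x0 + 1 + n) 1).map (colB r0 r1 r2 alg)) := by
  induction n with
  | zero =>
      rw [show x0 + 1 + (0 : Nat) = x0 + 1 by norm_num,
        PySem.List.pyRange_one_eq_nil (le_refl _)]
      simp
  | succ n ih =>
      have hsplit : (PySem.List.pyRange (x0 + 1) (x0 + 1 + (n + 1 : Nat)) 1)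
          = PySem.List.pyRange (x0 + 1) (x0 + 1 + n) 1 ++ [x0 + 1 + n] := by
        rw [show x0 + 1 + ((n : Nat) + 1 : Nat) = (x0 + 1 + n) + 1 by push_cast; ring]
        exact PySem.List.pyRange_one_succ_right (by omega)
      rw [hsplit, List.foldl_append, ih, List.map_append]
      simp only [List.foldl_cons, List.foldl_nil]
      have e1 : x0 + 1 + (n : Int) + 1 = x0 + (n : Int) + 2 := by ring
      rw [e1, roll r0 (x0 + n), roll r1 (x0 + n), roll r2 (x0 + n)]
      simp only [colB, List.map_singleton, List.append_assoc]
      push_cast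
      ring_nf

lemma pyPix_eq_chAt (img : List String) (y : Int) (h0 : 0 ≤ y)
    (h1 : y < (img.length : Int)) (z : Int) :
    pyPix img y z = chAt ((PySem.List.pyGet? img y).getD "") z := by
  unfold pyPix chAt
  rw [PySem.List.pyGet?_eq_some_getElem img h0 h1]
  simp

lemma rowFacts (img : List String) (t : Int) (ht0 : 0 ≤ t) (ht1 : t < (img.length : Int))
    (hrows : ∀ r ∈ img, r.toList.length = (img.headD "").toList.length ∧
      ∀ c ∈ r.toList, c = '.' ∨ c = '#') :
    ((PySem.List.pyGet? img t).getD "").toList.length = (img.headD "").toList.length ∧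
      ∀ c ∈ ((PySem.List.pyGet? img t).getD "").toList, c = '.' ∨ c = '#' := by
  rw [PySem.List.pyGet?_eq_some_getElem img ht0 ht1]
  simpa using hrows _ (List.getElem_mem _)

lemma main_eq (img : List String) (alg : String) (hpre : Pre_enhance_img img alg) :
    enhance_img img alg = enhance_img_alt img alg := by
  by_cases hh : img.length ≤ 2
  · have hA : PySem.List.pyRange 1 (PySem.List.len img - 1) 1 = [] :=
      PySem.List.pyRange_one_eq_nil (by simp [PySem.List.len_eq]; omega)
    have hB : PySem.List.len img ≤ 2 := by simp [PySem.List.len_eq]; omega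
    simp only [enhance_img, enhance_img_alt]
    rw [hA, if_pos hB]
    rfl
  · have hw0 : (PySem.List.pyGet? img 0).getD "" = img.headD "" := by
      rw [PySem.List.pyGet?_zero]; cases img <;> simp
    simp only [enhance_img, enhance_img_alt, hw0, PySem.Str.len_eq, PySem.List.len_eq]
    rw [if_neg (by omega)]
    by_cases hww : (img.headD "").toList.length ≤ 2
    · have hc2 : (((img.headD "").toList.length : Nat) : Int) ≤ 2 := by exact_mod_cast hww
      have hA : PySem.List.pyRange 1 ((((img.headD "").toList.length : Nat) : Int) - 1) 1 = [] :=
        PySem.List.pyRange_one_eq_nil (by omega)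
      simp only [hA, List.foldl_nil, if_pos hc2,
        PySem.List.foldl_append_singleton_eq_map, List.nil_append]
    · obtain ⟨halg, hrows⟩ :
          512 ≤ alg.toList.length ∧
            ∀ r ∈ img, r.toList.length = (img.headD "").toList.length ∧
              ∀ c ∈ r.toList, c = '.' ∨ c = '#' := by
        rcases hpre with h | h | h
        · omega
        · omega
        · exact h
      have hc2 : ¬ ((((img.headD "").toList.length : Nat) : Int) ≤ 2) := by omega
      simp only [if_neg hc2, PySem.List.foldl_append_singleton_eq_map,
        List.foldl_cons, List.foldl_nil, List.nil_append, List.cons_append]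
      apply List.map_congr_left
      intro y hy
      rw [PySem.List.mem_pyRange_one] at hy
      have hylt : y < (img.length : Int) - 1 := hy.2
      congr 1
      -- name the three rows
      set R0 := (PySem.List.pyGet? img (y - 1)).getD "" with hR0
      set R1 := (PySem.List.pyGet? img y).getD "" with hR1
      set R2 := (PySem.List.pyGet? img (y + 1)).getD "" with hR2
      -- B side: rolling fold = map of colB
      have e0 : hashBit (chAt R0 0) * 4 + hashBit (chAt R0 1) * 2 + hashBit (chAt R0 2)
          = winv R0 1 := by norm_num [winv]
      have e1 : hashBit (chAt R1 0) * 4 + hashBit (chAt R1 1) * 2 + hashBit (chAt R1 2)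
          = winv R1 1 := by norm_num [winv]
      have e2 : hashBit (chAt R2 0) * 4 + hashBit (chAt R2 1) * 2 + hashBit (chAt R2 2)
          = winv R2 1 := by norm_num [winv]
      rw [e0, e1, e2]
      rw [show ((((img.headD "").toList.length : Nat) : Int) - 1)
          = 2 + (((img.headD "").toList.length - 3 : Nat) : Int) by omega]
      rw [show ([(PySem.Str.pyGet? alg (winv R0 1 * 64 + winv R1 1 * 8 + winv R2 1)).getD ' ']
          : List Char) = [colB R0 R1 R2 alg 1] from rfl]
      have hr := rollFold R0 R1 R2 alg 1 ((img.headD "").toList.length - 3) [colB R0 R1 R2 alg 1]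
      simp only [show (1 : Int) + 1 = 2 from by norm_num] at hr
      rw [hr]
      dsimp only
      have hcons : (PySem.List.pyRange 1 (2 + (((img.headD "").toList.length - 3 : Nat) : Int)) 1)
          = 1 :: PySem.List.pyRange 2 (2 + (((img.headD "").toList.length - 3 : Nat) : Int)) 1 := by
        rw [PySem.List.pyRange_one_cons (by omega)]
        norm_num
      rw [List.singleton_append, ← List.map_cons, ← hcons]
      apply List.map_congr_left
      intro x hx
      rw [PySem.List.mem_pyRange_one] at hx
      have hxlt : x < ((img.headD "").toList.length : Int) - 1 := by
        rcases hx with ⟨hx1, hx2⟩; omega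
      -- A side pixel accesses become chAt on the three rows
      rw [show y + -1 = y - 1 from by ring, show y + 0 = y from by ring,
        show x + -1 = x - 1 from by ring, show x + 0 = x from by ring]
      simp only [pyPix_eq_chAt img (y - 1) (by omega) (by omega),
        pyPix_eq_chAt img y (by omega) (by omega),
        pyPix_eq_chAt img (y + 1) (by omega) (by omega), ← hR0, ← hR1, ← hR2]
      -- the 9 pixels are binary
      have hf0 := rowFacts img (y - 1) (by omega) (by omega) hrows
      have hf1 := rowFacts img y (by omega) (by omega) hrows
      have hf2 := rowFacts img (y + 1) (by omega) (by omega) hrows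
      rw [← hR0] at hf0; rw [← hR1] at hf1; rw [← hR2] at hf2
      have hbin : ∀ c ∈ [chAt R0 (x - 1), chAt R0 x, chAt R0 (x + 1),
          chAt R1 (x - 1), chAt R1 x, chAt R1 (x + 1),
          chAt R2 (x - 1), chAt R2 x, chAt R2 (x + 1)], c = '.' ∨ c = '#' := by
        intro c hc
        have hx1 := hx.1
        simp only [List.mem_cons, List.not_mem_nil, or_false] at hc
        rcases hc with rfl | rfl | rfl | rfl | rfl | rfl | rfl | rfl | rfl
        · exact chAt_binary _ _ hf0.1 hf0.2 _ (by omega) (by omega)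
        · exact chAt_binary _ _ hf0.1 hf0.2 _ (by omega) (by omega)
        · exact chAt_binary _ _ hf0.1 hf0.2 _ (by omega) (by omega)
        · exact chAt_binary _ _ hf1.1 hf1.2 _ (by omega) (by omega)
        · exact chAt_binary _ _ hf1.1 hf1.2 _ (by omega) (by omega)
        · exact chAt_binary _ _ hf1.1 hf1.2 _ (by omega) (by omega)
        · exact chAt_binary _ _ hf2.1 hf2.2 _ (by omega) (by omega)
        · exact chAt_binary _ _ hf2.1 hf2.2 _ (by omega) (by omega)
        · exact chAt_binary _ _ hf2.1 hf2.2 _ (by omega) (by omega)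
      rw [parse9 _ rfl hbin]
      simp only [colB]
      rw [show binVal [chAt R0 (x - 1), chAt R0 x, chAt R0 (x + 1),
          chAt R1 (x - 1), chAt R1 x, chAt R1 (x + 1),
          chAt R2 (x - 1), chAt R2 x, chAt R2 (x + 1)]
          = winv R0 x * 64 + winv R1 x * 8 + winv R2 x from by
        simp [binVal, winv, List.foldl]; ring]

-- ===== VERDICT (by name: the statement is the Claim_ definition above) =====
theorem enhance_img_spec : Claim_equal_enhance_img := by
  intro img alg _ hpre
  unfold Spec_enhance_img
  exact main_eq img alg hpre
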